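-- pv_equiv track=rewrite | github.com/CHWR-NCSTATE/coregs | coregs.py | get_prefix
-- ===== SOURCE A (Python) =====
-- def get_prefix(start_month, nmonths):
--     """Determine the prefix of the scenario for a
--     quarterly run.
--
--     Arguments:
--         start_month {str} -- Starting month as MM
--         nmonths {int} -- number of months of run
--
--     Returns:
--         str -- Month initials for the scenario (e.g "JFM")
--     """
--     file_prefix_values = []
--     # initials for each month
--     month_letters = ["J", "F", "M", "A", "M", "J", "J", "A", "S", "O", "N", "D"]
--     # index by 0 but start_month = 1
--     start_index = int(start_month) - 1
--     # modulus allows indexes greater than 11 to work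
--     file_prefix_values = [
--         month_letters[i % 12] for i in range(start_index, start_index + nmonths)
--     ]
--     return "".join(file_prefix_values)
-- ===== SOURCE B (Python) =====
-- def get_prefix(start_month, nmonths):
--     """Determine the prefix of the scenario for a quarterly run."""
--     # 12 month initials as one constant string
--     month_string = "JFMAMJJASOND"
--     # normalize the 0-based start index into [0, 12)
--     idx = (int(start_month) - 1) % 12
--     if nmonths <= 0:
--         return ""
--     # enough repetitions to cover idx + nmonths, then slice
--     full = month_string * (nmonths // 12 + 2)
--     return full[idx:idx + nmonths]
-- ===== Notes on version B (the rewrite author's own statement) =====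
-- stated objective: simpler
-- what changed: Replaces the element-by-element modulo-indexed list comprehension plus join with one normalized start index, string repetition and a single slice.
import Mathlib
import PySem

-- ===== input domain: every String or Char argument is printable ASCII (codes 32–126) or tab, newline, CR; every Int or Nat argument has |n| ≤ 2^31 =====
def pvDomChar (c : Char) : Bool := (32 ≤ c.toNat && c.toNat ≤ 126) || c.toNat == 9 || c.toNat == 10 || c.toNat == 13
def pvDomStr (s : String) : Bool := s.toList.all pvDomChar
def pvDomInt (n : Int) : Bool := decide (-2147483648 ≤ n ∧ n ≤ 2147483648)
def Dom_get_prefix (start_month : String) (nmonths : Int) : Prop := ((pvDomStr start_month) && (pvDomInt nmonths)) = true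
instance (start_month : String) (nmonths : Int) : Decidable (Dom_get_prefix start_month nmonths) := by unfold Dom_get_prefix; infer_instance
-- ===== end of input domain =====

-- B replaces A's modulo-indexed list comprehension + join by a normalized start index,
-- string repetition and a single slice (objective: simpler).


-- ===== PORT A =====
def get_prefix (start_month : String) (nmonths : Int) : String :=
  match PySem.Int.ofStr? start_month with
  | none => ""   -- int(start_month) raises ValueError; excluded by Pre_get_prefix
  | some m =>
    let month_letters : List String := ["J", "F", "M", "A", "M", "J", "J", "A", "S", "O", "N", "D"]
    let start_index := m - 1
    let file_prefix_values :=
      (PySem.List.pyRange start_index (start_index + nmonths) 1).map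
        (fun i => PySem.List.pyGetD month_letters (PySem.Int.mod i 12) "")
    PySem.Str.join "" file_prefix_values

-- ===== PORT B =====
def get_prefix_alt (start_month : String) (nmonths : Int) : String :=
  match PySem.Int.ofStr? start_month with
  | none => ""   -- int(start_month) raises ValueError; excluded by Pre_get_prefix
  | some m =>
    let month_string := "JFMAMJJASOND"
    let idx := PySem.Int.mod (m - 1) 12
    if nmonths ≤ 0 then "" else
    -- month_string * (nmonths // 12 + 2), exact on code points
    let full := String.ofList
      (PySem.List.pyRepeat month_string.toList (PySem.Int.floordiv nmonths 12 + 2))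
    PySem.Str.slice full (some idx) (some (idx + nmonths))

-- ===== PRECONDITION & SPEC =====
-- Pre_ excludes exactly the inputs where int(start_month) raises ValueError (both programs raise there).
def Pre_get_prefix (start_month : String) (nmonths : Int) : Prop :=
  (PySem.Int.ofStr? start_month).isSome = true
instance (start_month : String) (nmonths : Int) : Decidable (Pre_get_prefix start_month nmonths) := by unfold Pre_get_prefix; infer_instance

def pvWitness_get_prefix : String × Int := ("11", 4)

def Spec_get_prefix (start_month : String) (nmonths : Int) (out : String) : Prop := out = get_prefix_alt start_month nmonths
instance (start_month : String) (nmonths : Int) (out : String) : Decidable (Spec_get_prefix start_month nmonths out) := by unfold Spec_get_prefix; infer_instance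

-- ===== CLAIM (what is proved, stated in full; the proofs are below) =====
def Claim_equal_get_prefix : Prop := ∀ (start_month : String) (nmonths : Int), Dom_get_prefix start_month nmonths → Pre_get_prefix start_month nmonths → Spec_get_prefix start_month nmonths (get_prefix start_month nmonths)

-- ===== LEMMAS AND PROOFS =====

-- the month initials as a char list (= "JFMAMJJASOND".toList)
def pvMonthChars : List Char := ['J', 'F', 'M', 'A', 'M', 'J', 'J', 'A', 'S', 'O', 'N', 'D']

lemma pvMonthChars_eq : "JFMAMJJASOND".toList = pvMonthChars := by decide

-- A's per-element string is a singleton of the corresponding month char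
lemma pv_letter_toList (i : Int) :
    (PySem.List.pyGetD ["J", "F", "M", "A", "M", "J", "J", "A", "S", "O", "N", "D"]
        (PySem.Int.mod i 12) "").toList
      = [pvMonthChars.getD (PySem.Int.mod i 12).toNat 'X'] := by
  have h0 : (0:Int) ≤ PySem.Int.mod i 12 := PySem.Int.mod_nonneg i (by norm_num)
  have h12 : PySem.Int.mod i 12 < 12 := PySem.Int.mod_lt i (by norm_num)
  set r : Nat := (PySem.Int.mod i 12).toNat with hr
  have hcast : PySem.Int.mod i 12 = (r : Int) := (Int.toNat_of_nonneg h0).symm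
  have hrlt : r < 12 := by omega
  rw [hcast, PySem.List.pyGetD_natCast]
  interval_cases r <;> rfl

-- element p of (replicate R l).flatten is l[p % l.length]
lemma pv_flatten_replicate_getElem? {α : Type} (l : List α) (R : Nat) (p : Nat)
    (hl : l ≠ []) (hp : p < R * l.length) :
    ((List.replicate R l).flatten)[p]? = l[p % l.length]? := by
  induction R generalizing p with
  | zero => omega
  | succ R ih =>
    rw [List.replicate_succ, List.flatten_cons]
    have hlpos : 0 < l.length := List.length_pos_iff.mpr hl
    rw [Nat.succ_mul] at hp
    by_cases h : p < l.length
    · rw [List.getElem?_append_left h, Nat.mod_eq_of_lt h]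
    · have hle : l.length ≤ p := Nat.le_of_not_lt h
      rw [List.getElem?_append_right hle, ih (p - l.length) (by omega)]
      congr 1
      conv_rhs => rw [show p = (p - l.length) + 1 * l.length by omega]
      rw [Nat.add_mul_mod_self_right]

-- the core list identity behind the equivalence (s = start_index, 0 < n)
lemma pv_core (s n : Int) (hn : 0 < n) :
    (List.range n.toNat).map
        (fun (k : Nat) => pvMonthChars.getD (PySem.Int.mod (s + (k : Int)) 12).toNat 'X')
      = List.take ((PySem.Int.mod s 12 + n).toNat - (PySem.Int.mod s 12).toNat)
          (List.drop (PySem.Int.mod s 12).toNat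
            ((List.replicate (PySem.Int.floordiv n 12 + 2).toNat pvMonthChars).flatten)) := by
  have hidx0 : (0:Int) ≤ PySem.Int.mod s 12 := PySem.Int.mod_nonneg s (by norm_num)
  have hidx12 : PySem.Int.mod s 12 < 12 := PySem.Int.mod_lt s (by norm_num)
  have hmodn0 : (0:Int) ≤ PySem.Int.mod n 12 := PySem.Int.mod_nonneg n (by norm_num)
  have hmodn12 : PySem.Int.mod n 12 < 12 := PySem.Int.mod_lt n (by norm_num)
  have hdiv : PySem.Int.floordiv n 12 * 12 + PySem.Int.mod n 12 = n :=
    PySem.Int.floordiv_mul_add_mod n 12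
  set j : Nat := (PySem.Int.mod s 12).toNat with hj
  set N : Nat := n.toNat with hN
  set R : Nat := (PySem.Int.floordiv n 12 + 2).toNat with hR
  have hjs : (j : Int) = PySem.Int.mod s 12 := Int.toNat_of_nonneg hidx0
  have htake : (PySem.Int.mod s 12 + n).toNat - j = N := by omega
  have hlen : pvMonthChars.length = 12 := by decide
  have hflat : ((List.replicate R pvMonthChars).flatten).length = R * 12 := by
    simp [List.length_flatten, hlen, Nat.mul_comm]
  have hRbig : j + N + 1 ≤ R * 12 := by
    have hRc : (R : Int) = PySem.Int.floordiv n 12 + 2 := Int.toNat_of_nonneg (by omega)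
    have h24 : (R : Int) * 12 = n - PySem.Int.mod n 12 + 24 := by rw [hRc]; linarith
    omega
  rw [htake]
  apply List.ext_getElem?
  intro i
  by_cases hi : i < N
  · have hmods0 : (0:Int) ≤ PySem.Int.mod (s + (i:Int)) 12 :=
      PySem.Int.mod_nonneg _ (by norm_num)
    have hmods12 : PySem.Int.mod (s + (i:Int)) 12 < 12 :=
      PySem.Int.mod_lt _ (by norm_num)
    have hlt : (PySem.Int.mod (s + (i:Int)) 12).toNat < pvMonthChars.length := by omega
    have hidx_eq : (j + i) % pvMonthChars.length = (PySem.Int.mod (s + (i:Int)) 12).toNat := by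
      have h1 : PySem.Int.mod s 12 = s % 12 := PySem.Int.mod_eq_emod_of_pos (by norm_num)
      have h2 : PySem.Int.mod (s + (i:Int)) 12 = (s + (i:Int)) % 12 :=
        PySem.Int.mod_eq_emod_of_pos (by norm_num)
      rw [hlen]
      omega
    rw [List.getElem?_take_of_lt hi, List.getElem?_drop,
        pv_flatten_replicate_getElem? pvMonthChars R (j + i) (by decide) (by rw [hlen]; omega),
        hidx_eq, List.getElem?_map, List.getElem?_range hi, Option.map_some,
        List.getElem?_eq_getElem hlt, List.getD_eq_getElem _ 'X' hlt]
  · have h1 : ((List.range N).map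
        (fun (k : Nat) => pvMonthChars.getD (PySem.Int.mod (s + (k : Int)) 12).toNat 'X'))[i]? = none := by
      rw [List.getElem?_eq_none]; simpa using Nat.le_of_not_lt hi
    have h2 : (List.take N (List.drop j ((List.replicate R pvMonthChars).flatten)))[i]? = none := by
      rw [List.getElem?_eq_none]
      have := List.length_take_le N (List.drop j ((List.replicate R pvMonthChars).flatten))
      omega
    rw [h1, h2]

-- ===== VERDICT (by name: the statement is the Claim_ definition above) =====
theorem get_prefix_spec : Claim_equal_get_prefix := by
  intro start_month nmonths _ hpre
  unfold Spec_get_prefix get_prefix get_prefix_alt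
  obtain ⟨m, hm⟩ := Option.isSome_iff_exists.mp hpre
  rw [hm]
  dsimp only
  by_cases hn : nmonths ≤ 0
  · rw [if_pos hn]
    rw [PySem.List.pyRange_one_eq_nil (by omega)]
    simp only [List.map_nil]
    decide
  · rw [if_neg hn]
    rw [← String.toList_inj]
    rw [PySem.Str.toList_join, PySem.Str.toList_slice]
    rw [PySem.List.pyRange_one]
    have hlen : (m - 1 + nmonths - (m - 1)).toNat = nmonths.toNat := by omega
    rw [hlen, List.map_map, List.map_map]
    have hmaps : (List.range nmonths.toNat).map
        ((String.toList ∘ fun i => PySem.List.pyGetD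
            ["J", "F", "M", "A", "M", "J", "J", "A", "S", "O", "N", "D"]
            (PySem.Int.mod i 12) "") ∘ fun (k : Nat) => m - 1 + (k : Int))
        = ((List.range nmonths.toNat).map
            (fun (k : Nat) => pvMonthChars.getD (PySem.Int.mod (m - 1 + (k : Int)) 12).toNat 'X')).map
            (fun c => [c]) := by
      rw [List.map_map]
      exact List.map_congr_left (fun k _ => pv_letter_toList (m - 1 + (k : Int)))
    rw [hmaps]
    have hjoin := PySem.Chars.join_nil_singletons
      ((List.range nmonths.toNat).map
        (fun (k : Nat) => pvMonthChars.getD (PySem.Int.mod (m - 1 + (k : Int)) 12).toNat 'X'))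
    have hempty : ("" : String).toList = ([] : List Char) := by decide
    rw [hempty, hjoin, PySem.Chars.slice_eq_listSlice, String.toList_ofList]
    have hrep : PySem.List.pyRepeat "JFMAMJJASOND".toList (PySem.Int.floordiv nmonths 12 + 2)
        = (List.replicate (PySem.Int.floordiv nmonths 12 + 2).toNat pvMonthChars).flatten := by
      simp [PySem.List.pyRepeat, pvMonthChars_eq]
    have hi0 : (0:Int) ≤ PySem.Int.mod (m - 1) 12 := PySem.Int.mod_nonneg _ (by norm_num)
    rw [hrep, PySem.List.slice_toNat _ (a := PySem.Int.mod (m - 1) 12)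
      (b := PySem.Int.mod (m - 1) 12 + nmonths) hi0 (by omega)]
    exact pv_core (m - 1) nmonths (by omega)
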